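-- pv_equiv track=rewrite | github.com/gukoff/ballmer_puzzle | main.py | guess_low_payouts
-- ===== SOURCE A (Python) =====
-- def guess_low_payouts(payouts, length_of_guesses, high=False):
--     """
--     :param payouts: Ballmer's payout for choosing x
--     Assume Ballmer will stick to the numbers with the lowest payouts,
--     so we should binary-search among them first; then among the next-highest payouts,
--     and so on. Return the list of guesses we should make.
--     """
--     n = len(payouts)
--     sorted_payouts = sorted(set(payouts))
--     if high:
--       sorted_payouts = sorted_payouts[::-1]
--     guesses = []
--
--     def distribute(guesses, batch):
--         if batch:
--             m = len(batch) // 2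
--             guesses.append(batch[m])
--             distribute(guesses, batch[:m])
--             distribute(guesses, batch[m+1:])
--
--     for k in range(n):
--         batch = [i for i in range(n) if (payouts[i] >= sorted_payouts[k] if high else payouts[i] <= sorted_payouts[k])]
--         if (len(batch) >= length_of_guesses) or (k == len(sorted_payouts)-1):
--             distribute(guesses, batch)
--             break
--
--     return guesses
-- ===== SOURCE B (Python) =====
-- def guess_low_payouts(payouts, length_of_guesses, high=False):
--     """Same result as the original, computed in O(n log n): count payouts once,
--     scan the sorted distinct values for the cutoff threshold, build the batch in
--     one pass, then emit the binary-search order with an explicit stack."""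
--     n = len(payouts)
--     if n == 0:
--         return []
--     vals = sorted(set(payouts), reverse=high)
--     counts = {}
--     for p in payouts:
--         counts[p] = counts.get(p, 0) + 1
--     threshold = vals[-1]
--     cum = 0
--     for v in vals:
--         cum += counts[v]
--         if cum >= length_of_guesses:
--             threshold = v
--             break
--     if high:
--         batch = [i for i, p in enumerate(payouts) if p >= threshold]
--     else:
--         batch = [i for i, p in enumerate(payouts) if p <= threshold]
--     guesses = []
--     stack = [(0, len(batch))]
--     while stack:
--         lo, hi = stack.pop()
--         if lo < hi:
--             m = (lo + hi) // 2
--             guesses.append(batch[m])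
--             stack.append((m + 1, hi))
--             stack.append((lo, m))
--     return guesses
-- ===== Notes on version B (the rewrite author's own statement) =====
-- stated objective: faster
-- what changed: Instead of rebuilding the index batch from scratch for every candidate payout level (quadratic rescans), B counts payout multiplicities once in a dict, finds the cutoff threshold by a single cumulative scan over the sorted distinct values, builds the batch in one pass, and replaces the recursive distribute with an explicit-stack loop over index ranges.
import Mathlib
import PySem

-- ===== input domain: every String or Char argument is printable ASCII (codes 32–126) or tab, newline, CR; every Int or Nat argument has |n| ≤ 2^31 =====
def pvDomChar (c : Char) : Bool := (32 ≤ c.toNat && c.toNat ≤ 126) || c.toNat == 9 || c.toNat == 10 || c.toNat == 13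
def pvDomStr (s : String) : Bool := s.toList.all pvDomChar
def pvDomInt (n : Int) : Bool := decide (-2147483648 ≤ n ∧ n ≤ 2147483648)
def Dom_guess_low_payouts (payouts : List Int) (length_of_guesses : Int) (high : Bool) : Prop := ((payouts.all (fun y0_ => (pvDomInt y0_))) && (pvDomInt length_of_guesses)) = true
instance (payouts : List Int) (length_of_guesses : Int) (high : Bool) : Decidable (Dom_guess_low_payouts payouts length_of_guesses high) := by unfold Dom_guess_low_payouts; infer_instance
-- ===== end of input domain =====

-- B replaces A's per-level rebuild of the batch (quadratic rescans) by a one-pass counter,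
-- a single cumulative scan of the sorted distinct values for the threshold, one batch pass,
-- and an explicit-stack loop instead of the recursive distribute (measured asymptotically faster).

-- ===== PORT A =====
-- distribute(guesses, batch): append batch[m], recurse on batch[:m] and batch[m+1:]
-- (batch[:m] / batch[m+1:] are nonnegative in-range slices = take m / drop (m+1);
--  batch[m] with 0 ≤ m < len batch is getD m 0 — exact here)
def pvDistA (guesses batch : List Int) : List Int :=
  if _h : batch = [] then guesses
  else
    let m := batch.length / 2
    pvDistA (pvDistA (guesses ++ [batch.getD m 0]) (batch.take m)) (batch.drop (m + 1))
termination_by batch.length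
decreasing_by
  all_goals have : batch.length ≠ 0 := by simpa [List.length_eq_zero_iff] using _h
  all_goals simp [List.length_take, List.length_drop]; omega

-- the 'for k in range(n): … break' loop of A, entered at index k
def pvLoopA (payouts sp : List Int) (L : Int) (high : Bool) (n k : Nat) : List Int :=
  if _h : k < n then
    let batch := (PySem.List.pyRange 0 (n : Int) 1).filter (fun i =>
      if high then decide (PySem.List.pyGetD sp (k : Int) 0 ≤ PySem.List.pyGetD payouts i 0)
      else decide (PySem.List.pyGetD payouts i 0 ≤ PySem.List.pyGetD sp (k : Int) 0))
    if L ≤ (batch.length : Int) ∨ (k : Int) = (sp.length : Int) - 1 then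
      pvDistA [] batch
    else pvLoopA payouts sp L high n (k + 1)
  else []
termination_by n - k

def guess_low_payouts (payouts : List Int) (length_of_guesses : Int) (high : Bool) : List Int :=
  let n := payouts.length
  let sp0 := PySem.List.sorted (PySem.Set.ofList payouts) (fun x => x) false
  let sp := if high then sp0.reverse else sp0   -- sorted_payouts[::-1]
  pvLoopA payouts sp length_of_guesses high n 0

-- ===== PORT B =====
-- counts[p] = counts.get(p, 0) + 1 loop
def pvCountsB (payouts : List Int) : PySem.Dict Int Int :=
  payouts.foldl (fun d p => d.insert p (d.getD p 0 + 1)) PySem.Dict.empty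

-- the cumulative threshold scan: returns the first v with cum ≥ L, else the initial t (vals[-1])
def pvFindT (counts : PySem.Dict Int Int) (L : Int) : List Int → Int → Int → Int
  | [], _cum, t => t
  | v :: rest, cum, t =>
      let c := cum + counts.getD v 0
      if L ≤ c then v else pvFindT counts L rest c t

-- the explicit-stack while loop ('stack.pop()' takes the head; batch[m] in range = getD m 0)
def pvStackB (batch : List Int) : List (Nat × Nat) → List Int → List Int
  | [], gs => gs
  | (lo, hi) :: rest, gs =>
      if lo < hi then
        let m := (lo + hi) / 2
        pvStackB batch ((lo, m) :: (m + 1, hi) :: rest) (gs ++ [batch.getD m 0])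
      else pvStackB batch rest gs
termination_by stack => (stack.map (fun q => 2 * (q.2 - q.1) + 1)).sum
decreasing_by
  all_goals simp
  all_goals omega

def guess_low_payouts_alt (payouts : List Int) (length_of_guesses : Int) (high : Bool) : List Int :=
  let n := payouts.length
  if n = 0 then []
  else
    let vals := PySem.List.sorted (PySem.Set.ofList payouts) (fun x => x) high
    let counts := pvCountsB payouts
    let t := pvFindT counts length_of_guesses vals 0 (PySem.List.pyGetD vals (-1) 0)
    let batch := if high then
        ((PySem.List.enumerate payouts 0).filter (fun q => decide (t ≤ q.2))).map (fun q => q.1)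
      else
        ((PySem.List.enumerate payouts 0).filter (fun q => decide (q.2 ≤ t))).map (fun q => q.1)
    pvStackB batch [(0, batch.length)] []

-- ===== PRECONDITION & SPEC =====
def Spec_guess_low_payouts (payouts : List Int) (length_of_guesses : Int) (high : Bool) (out : List Int) : Prop := out = guess_low_payouts_alt payouts length_of_guesses high
instance (payouts : List Int) (length_of_guesses : Int) (high : Bool) (out : List Int) : Decidable (Spec_guess_low_payouts payouts length_of_guesses high out) := by unfold Spec_guess_low_payouts; infer_instance

-- ===== CLAIM (what is proved, stated in full; the proofs are below) =====
def Claim_equal_guess_low_payouts : Prop := ∀ (payouts : List Int) (length_of_guesses : Int) (high : Bool), Dom_guess_low_payouts payouts length_of_guesses high → Spec_guess_low_payouts payouts length_of_guesses high (guess_low_payouts payouts length_of_guesses high)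

-- ===== LEMMAS AND PROOFS =====

-- the binary-search emission order on the index segment [lo, hi) of batch
def pvSegD (batch : List Int) (lo hi : Nat) : List Int :=
  if lo < hi then
    batch.getD ((lo + hi) / 2) 0 ::
      (pvSegD batch lo ((lo + hi) / 2) ++ pvSegD batch ((lo + hi) / 2 + 1) hi)
  else []
termination_by hi - lo
decreasing_by
  all_goals omega

lemma pvSegD_congr (batch batch' : List Int) (lo hi : Nat)
    (h : ∀ j, lo ≤ j → j < hi → batch.getD j 0 = batch'.getD j 0) :
    pvSegD batch lo hi = pvSegD batch' lo hi := by
  by_cases hlt : lo < hi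
  · conv_lhs => rw [pvSegD]
    conv_rhs => rw [pvSegD]
    rw [if_pos hlt, if_pos hlt]
    rw [h _ (by omega) (by omega),
        pvSegD_congr batch batch' lo ((lo + hi) / 2) (fun j h1 h2 => h j h1 (by omega)),
        pvSegD_congr batch batch' ((lo + hi) / 2 + 1) hi (fun j h1 h2 => h j (by omega) h2)]
  · conv_lhs => rw [pvSegD]
    conv_rhs => rw [pvSegD]
    rw [if_neg hlt, if_neg hlt]
termination_by hi - lo
decreasing_by all_goals omega

lemma pvSegD_take (batch : List Int) (c lo hi : Nat) (hc : hi ≤ c) :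
    pvSegD (batch.take c) lo hi = pvSegD batch lo hi := by
  refine pvSegD_congr _ _ _ _ (fun j h1 h2 => ?_)
  simp [List.getD_eq_getElem?_getD, show j < c by omega]

lemma pvSegD_drop (batch : List Int) (off lo hi : Nat) :
    pvSegD (batch.drop off) lo hi = pvSegD batch (off + lo) (off + hi) := by
  by_cases hlt : lo < hi
  · conv_lhs => rw [pvSegD]
    conv_rhs => rw [pvSegD]
    rw [if_pos hlt, if_pos (show off + lo < off + hi by omega)]
    have hmid : (off + lo + (off + hi)) / 2 = off + (lo + hi) / 2 := by omega
    have hget : (batch.drop off).getD ((lo + hi) / 2) 0 = batch.getD (off + (lo + hi) / 2) 0 := by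
      simp [List.getD_eq_getElem?_getD, List.getElem?_drop]
    have e1 := pvSegD_drop batch off lo ((lo + hi) / 2)
    have e2 := pvSegD_drop batch off ((lo + hi) / 2 + 1) hi
    rw [show off + ((lo + hi) / 2 + 1) = off + (lo + hi) / 2 + 1 from by omega] at e2
    rw [hmid, hget, e1, e2]
  · conv_lhs => rw [pvSegD]
    conv_rhs => rw [pvSegD]
    rw [if_neg hlt, if_neg (show ¬ (off + lo < off + hi) by omega)]
termination_by hi - lo
decreasing_by all_goals omega

lemma pvDistA_eq_segD (batch gs : List Int) :
    pvDistA gs batch = gs ++ pvSegD batch 0 batch.length := by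
  by_cases hb : batch = []
  · subst hb; rw [pvDistA]; simp [pvSegD]
  · have hlen : batch.length ≠ 0 := by simpa [List.length_eq_zero_iff] using hb
    rw [pvDistA, dif_neg hb]
    have h1 : (batch.take (batch.length / 2)).length = batch.length / 2 := by
      simp [List.length_take]; omega
    rw [pvDistA_eq_segD (batch.drop (batch.length / 2 + 1)),
        pvDistA_eq_segD (batch.take (batch.length / 2))]
    rw [h1, List.length_drop]
    rw [pvSegD_take batch (batch.length / 2) 0 (batch.length / 2) le_rfl]
    have hd := pvSegD_drop batch (batch.length / 2 + 1) 0 (batch.length - (batch.length / 2 + 1))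
    rw [show batch.length / 2 + 1 + 0 = batch.length / 2 + 1 from by omega,
        show batch.length / 2 + 1 + (batch.length - (batch.length / 2 + 1)) = batch.length from by omega] at hd
    rw [hd]
    conv_rhs => rw [pvSegD]
    rw [if_pos (show 0 < batch.length by omega),
        show (0 + batch.length) / 2 = batch.length / 2 from by omega]
    simp
termination_by batch.length
decreasing_by all_goals (simp [List.length_take, List.length_drop]; try omega)

lemma pvStackB_eq_segD (batch : List Int) (stack : List (Nat × Nat)) (gs : List Int) :
    pvStackB batch stack gs = gs ++ (stack.map (fun q => pvSegD batch q.1 q.2)).flatten := by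
  match stack with
  | [] => simp [pvStackB]
  | (lo, hi) :: rest =>
    by_cases hlt : lo < hi
    · rw [pvStackB, if_pos hlt, pvStackB_eq_segD]
      conv_rhs => rw [List.map_cons, List.flatten_cons, pvSegD, if_pos hlt]
      simp
    · rw [pvStackB, if_neg hlt, pvStackB_eq_segD]
      conv_rhs => rw [List.map_cons, List.flatten_cons, pvSegD, if_neg hlt]
      simp
termination_by (stack.map (fun q => 2 * (q.2 - q.1) + 1)).sum
decreasing_by all_goals (simp; try omega)

lemma pv_countP_disjoint (xs : List Int) (a b : Int → Bool)
    (hd : ∀ x, a x = true → b x = false) :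
    xs.countP (fun x => a x || b x) = xs.countP a + xs.countP b := by
  induction xs with
  | nil => simp
  | cons x xs ih =>
    by_cases ha : a x = true
    · have hb := hd x ha
      simp [ha, hb, ih]; omega
    · rw [Bool.not_eq_true] at ha
      cases hb : b x <;> (simp [ha, hb, ih]; try omega)

lemma pv_counts_getD (payouts : List Int) (v : Int) :
    (pvCountsB payouts).getD v 0 = (payouts.count v : Int) := by
  unfold pvCountsB
  rw [PySem.Dict.getD_foldl_insert_add_one]
  simp

lemma pv_filter_range_eq_map_enum (payouts : List Int) (q : Int → Bool) :
    (PySem.List.pyRange 0 (payouts.length : Int) 1).filter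
        (fun i => q (PySem.List.pyGetD payouts i 0))
      = ((PySem.List.enumerate payouts 0).filter (fun p => q p.2)).map (fun p => p.1) := by
  rw [PySem.List.enumerate_eq_map_pyRange (d := 0), List.filter_map, List.map_map]
  simp [Function.comp_def]

lemma pv_length_filter_enum (payouts : List Int) (q : Int → Bool) :
    ∀ s : Int, ((PySem.List.enumerate payouts s).filter (fun p => q p.2)).length
      = payouts.countP q := by
  induction payouts with
  | nil => intro s; simp [PySem.List.enumerate]
  | cons x xs ih =>
    intro s
    rw [PySem.List.enumerate_cons, List.filter_cons]
    cases hq : q x <;> simp [hq, ih]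

lemma pv_loop_eq_findT (payouts vals : List Int) (L : Int) (high : Bool)
    (le : Int → Int → Bool)
    (hco : ∀ a b : Int, (if high then decide (b ≤ a) else decide (a ≤ b)) = le a b)
    (hrefl : ∀ a, le a a = true)
    (hpair : vals.Pairwise (fun a b => le a b = true ∧ le b a = false))
    (hmem : ∀ p ∈ payouts, p ∈ vals)
    (hlen : vals.length ≤ payouts.length) :
    ∀ (suf pre : List Int), vals = pre ++ suf → suf ≠ [] →
    pvLoopA payouts vals L high payouts.length pre.length
      = pvDistA [] ((PySem.List.pyRange 0 (payouts.length : Int) 1).filter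
          (fun i => le (PySem.List.pyGetD payouts i 0)
              (pvFindT (pvCountsB payouts) L suf
                 ((payouts.countP (fun p => decide (p ∈ pre)) : Int))
                 (PySem.List.pyGetD vals (-1) 0)))) := by
  intro suf
  induction suf with
  | nil => intro pre h hne; exact absurd rfl hne
  | cons v rest ih =>
    intro pre hv _
    have hvne : vals ≠ [] := by rw [hv]; simp
    have hvlen : vals.length = pre.length + 1 + rest.length := by rw [hv]; simp; omega
    have hkn : pre.length < payouts.length := by omega
    have hget : vals.getD pre.length 0 = v := by
      rw [hv, List.getD_eq_getElem?_getD, List.getElem?_append_right (le_refl pre.length)]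
      simp
    rw [hv, List.pairwise_append] at hpair
    obtain ⟨hp1, hp2, hp3⟩ := hpair
    have hpre_v : ∀ a ∈ pre, le a v = true ∧ le v a = false :=
      fun a ha => hp3 a ha v (by simp)
    have hv_rest : ∀ b ∈ rest, le v b = true ∧ le b v = false :=
      fun b hb => (List.pairwise_cons.mp hp2).1 b hb
    have hv_not_pre : v ∉ pre := by
      intro hvp
      have := (hpre_v v hvp).2
      rw [hrefl v] at this
      simp at this
    have hchar : ∀ p ∈ payouts, le p v = (decide (p ∈ pre) || decide (p = v)) := by
      intro p hp
      by_cases hpp : p ∈ pre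
      · simp [hpp, (hpre_v p hpp).1]
      · by_cases hpv : p = v
        · subst hpv; simp [hrefl p]
        · have hpv2 : p ∈ vals := hmem p hp
          rw [hv] at hpv2
          simp [hpp, hpv] at hpv2 ⊢
          exact (hv_rest p hpv2).2
    have hcnt : payouts.countP (fun p => le p v)
        = payouts.countP (fun p => decide (p ∈ pre)) + payouts.count v := by
      rw [List.countP_congr (fun p hp => by rw [hchar p hp])]
      rw [pv_countP_disjoint payouts _ _ (fun x hx => by
        simp only [decide_eq_true_eq] at hx
        simp only [decide_eq_false_iff_not]
        intro hxv; exact hv_not_pre (hxv ▸ hx))]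
      congr 1
    have hcnt' : payouts.countP (fun p => decide (p ∈ pre ++ [v]))
        = payouts.countP (fun p => decide (p ∈ pre)) + payouts.count v := by
      have : (fun p => decide (p ∈ pre ++ [v]))
          = fun p => (decide (p ∈ pre) || decide (p = v)) := by
        funext p; simp [List.mem_append]
      rw [this]
      rw [pv_countP_disjoint payouts _ _ (fun x hx => by
        simp only [decide_eq_true_eq] at hx
        simp only [decide_eq_false_iff_not]
        intro hxv; exact hv_not_pre (hxv ▸ hx))]
      congr 1
    -- the A-side batch at index pre.length, rewritten through le
    have hfil : (fun i => if high
          then decide (PySem.List.pyGetD vals (pre.length : Int) 0 ≤ PySem.List.pyGetD payouts i 0)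
          else decide (PySem.List.pyGetD payouts i 0 ≤ PySem.List.pyGetD vals (pre.length : Int) 0))
        = (fun i => le (PySem.List.pyGetD payouts i 0) v) := by
      funext i
      rw [PySem.List.pyGetD_natCast, hget]
      exact hco _ _
    have hlenA : (((PySem.List.pyRange 0 (payouts.length : Int) 1).filter
          (fun i => le (PySem.List.pyGetD payouts i 0) v)).length : Int)
        = (payouts.countP (fun p => decide (p ∈ pre)) : Int) + (payouts.count v : Int) := by
      rw [pv_filter_range_eq_map_enum payouts (fun p => le p v), List.length_map,
        pv_length_filter_enum payouts (fun p => le p v) 0, hcnt]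
      push_cast
      ring
    rw [pvLoopA, dif_pos hkn]
    simp only [hfil]
    rw [pvFindT]
    simp only [pv_counts_getD]
    by_cases hbrk : L ≤ (payouts.countP (fun p => decide (p ∈ pre)) : Int) + (payouts.count v : Int)
    · rw [if_pos (Or.inl (by rw [hlenA]; exact hbrk)), if_pos hbrk]
    · have hnot1 : ¬ L ≤ (((PySem.List.pyRange 0 (payouts.length : Int) 1).filter
          (fun i => le (PySem.List.pyGetD payouts i 0) v)).length : Int) := by
        rw [hlenA]; exact hbrk
      rw [if_neg hbrk]
      by_cases hrest : rest = []
      · subst hrest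
        have hlast : PySem.List.pyGetD vals (-1) 0 = v := by
          rw [PySem.List.pyGetD_neg_one vals 0 hvne]
          simp [hv]
        rw [if_pos (Or.inr (by rw [hvlen]; push_cast; simp)), pvFindT, hlast]
      · have hklt : ¬ ((pre.length : Int) = (vals.length : Int) - 1) := by
          have : rest.length ≠ 0 := by
            simpa [List.length_eq_zero_iff] using hrest
          rw [hvlen]; push_cast; omega
        rw [if_neg (by push Not; exact ⟨by omega, hklt⟩)]
        have := ih (pre ++ [v]) (by rw [hv]; simp) hrest
        rw [List.length_append, List.length_cons, List.length_nil] at this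
        rw [hcnt'] at this
        push_cast at this ⊢
        exact this

lemma pv_assemble (B : List Int) :
    pvDistA [] B = pvStackB B [(0, B.length)] [] := by
  rw [pvDistA_eq_segD, pvStackB_eq_segD]
  simp

-- ===== VERDICT (by name: the statement is the Claim_ definition above) =====
theorem guess_low_payouts_spec : Claim_equal_guess_low_payouts := by
  unfold Claim_equal_guess_low_payouts
  intro payouts L high _dom
  unfold Spec_guess_low_payouts
  by_cases hemp : payouts = []
  · subst hemp
    simp [guess_low_payouts, guess_low_payouts_alt, pvLoopA]
  · have hlen0 : payouts.length ≠ 0 := by simpa [List.length_eq_zero_iff] using hemp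
    have hpl : (PySem.List.sorted (PySem.Set.ofList payouts) (fun x => x) false).Pairwise
        (fun a b => a < b) := PySem.List.sorted_ofList_pairwise_lt payouts
    have hperm : (PySem.List.sorted (PySem.Set.ofList payouts) (fun x => x) false).Perm
        (PySem.Set.ofList payouts) := PySem.List.sorted_perm ..
    have hmem0 : ∀ p ∈ payouts, p ∈ PySem.List.sorted (PySem.Set.ofList payouts) (fun x => x) false := by
      intro p hp
      rw [PySem.List.mem_sorted, PySem.Set.mem_ofList]
      exact hp
    have hlen1 : (PySem.List.sorted (PySem.Set.ofList payouts) (fun x => x) false).length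
        ≤ payouts.length := by
      rw [PySem.List.length_sorted]
      exact PySem.Set.length_ofList_le payouts
    have hne0 : PySem.List.sorted (PySem.Set.ofList payouts) (fun x => x) false ≠ [] := by
      obtain ⟨p, hp⟩ := List.exists_mem_of_ne_nil payouts hemp
      exact List.ne_nil_of_mem (hmem0 p hp)
    cases high with
    | false =>
      have key := pv_loop_eq_findT payouts
        (PySem.List.sorted (PySem.Set.ofList payouts) (fun x => x) false) L false
        (fun a b => decide (a ≤ b))
        (fun a b => by simp) (fun a => by simp)
        (hpl.imp (fun h => ⟨decide_eq_true (le_of_lt h), decide_eq_false (not_le.mpr h)⟩))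
        hmem0 hlen1
        (PySem.List.sorted (PySem.Set.ofList payouts) (fun x => x) false) [] (by simp) hne0
      rw [List.length_nil,
        show (payouts.countP (fun p => decide (p ∈ ([] : List Int))) : Int) = 0 from by simp] at key
      simp only [guess_low_payouts, guess_low_payouts_alt, Bool.false_eq_true, if_false,
        if_neg hlen0]
      rw [key, pv_filter_range_eq_map_enum payouts
        (fun p => decide (p ≤ pvFindT (pvCountsB payouts) L
          (PySem.List.sorted (PySem.Set.ofList payouts) (fun x => x) false) 0
          (PySem.List.pyGetD (PySem.List.sorted (PySem.Set.ofList payouts) (fun x => x) false) (-1) 0)))]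
      exact pv_assemble _
    | true =>
      have hrev : PySem.List.sorted (PySem.Set.ofList payouts) (fun x => x) true
          = (PySem.List.sorted (PySem.Set.ofList payouts) (fun x => x) false).reverse := by
        apply PySem.List.sorted_rev_eq_of_perm_of_pairwise_gt
        · exact (List.reverse_perm _).trans hperm
        · rw [List.pairwise_reverse]
          exact hpl
      have key := pv_loop_eq_findT payouts
        ((PySem.List.sorted (PySem.Set.ofList payouts) (fun x => x) false).reverse) L true
        (fun a b => decide (b ≤ a))
        (fun a b => by simp) (fun a => by simp)
        (by
          rw [List.pairwise_reverse]
          exact hpl.imp (fun h => ⟨decide_eq_true (le_of_lt h), decide_eq_false (not_le.mpr h)⟩))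
        (fun p hp => by rw [List.mem_reverse]; exact hmem0 p hp)
        (by rw [List.length_reverse]; exact hlen1)
        ((PySem.List.sorted (PySem.Set.ofList payouts) (fun x => x) false).reverse) []
        (by simp) (by simp [hne0])
      rw [List.length_nil,
        show (payouts.countP (fun p => decide (p ∈ ([] : List Int))) : Int) = 0 from by simp] at key
      simp only [guess_low_payouts, guess_low_payouts_alt, if_true, if_neg hlen0, hrev]
      rw [key, pv_filter_range_eq_map_enum payouts
        (fun p => decide (pvFindT (pvCountsB payouts) L
          ((PySem.List.sorted (PySem.Set.ofList payouts) (fun x => x) false).reverse) 0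
          (PySem.List.pyGetD ((PySem.List.sorted (PySem.Set.ofList payouts) (fun x => x) false).reverse) (-1) 0) ≤ p))]
      exact pv_assemble _
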